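-- pv_equiv track=rewrite | github.com/joshanashakya/dissertation | workspace/dataset/java-python/GeeksForGeeks/451/A/2.py | countIdenticalRows
-- ===== SOURCE A (Python) =====
-- def countIdenticalRows(mat):
--     count = 0
--
--     for i in range(len(mat)):
--
--         #HashSet for current row
--         hs=dict()
--
--         #Traverse the row
--         for j in range(len(mat[i])):
--
--             #Add all the values of the row in HashSet
--             hs[mat[i][j]]=1
--
--
--         #Check if size of HashSet = 1
--         if (len(hs)== 1):
--             count+=1
--
--
--     return count
-- ===== SOURCE B (Python) =====
-- def countIdenticalRows(mat):
--     # Recursive decomposition; a row is identical iff it is non-empty and its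
--     # minimum equals its maximum (an order-based test, no set/dict and no
--     # element-by-element comparison against the first entry).
--     if not mat:
--         return 0
--     row = mat[0]
--     here = 1 if row and min(row) == max(row) else 0
--     return here + countIdenticalRows(mat[1:])
-- ===== Notes on version B (the rewrite author's own statement) =====
-- stated objective: alternative
-- what changed: Replaces A's iterative per-row hash-set build and size test with a recursive decomposition over the rows whose per-row test is the order-based criterion min(row) == max(row) on non-empty rows.
import Mathlib
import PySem

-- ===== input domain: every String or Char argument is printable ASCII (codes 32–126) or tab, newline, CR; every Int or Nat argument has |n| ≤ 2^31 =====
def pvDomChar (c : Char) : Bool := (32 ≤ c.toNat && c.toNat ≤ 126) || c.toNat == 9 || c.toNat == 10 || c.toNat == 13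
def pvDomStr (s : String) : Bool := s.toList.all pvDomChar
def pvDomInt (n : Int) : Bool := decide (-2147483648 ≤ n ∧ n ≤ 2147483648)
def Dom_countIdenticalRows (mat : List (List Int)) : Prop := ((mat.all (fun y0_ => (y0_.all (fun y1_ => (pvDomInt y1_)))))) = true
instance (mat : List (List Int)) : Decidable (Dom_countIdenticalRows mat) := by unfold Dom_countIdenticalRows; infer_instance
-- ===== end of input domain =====

-- B replaces A's iterative per-row dict build + size test with a recursion over
-- the rows using the order-based test min(row) == max(row) on non-empty rows (alternative).

-- ===== PORT A =====
-- for each row, build a dict of its values, count the row if the dict has size 1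
def countIdenticalRows (mat : List (List Int)) : Int :=
  mat.foldl
    (fun count row =>
      let hs := row.foldl (fun d x => d.insert x (1 : Int)) PySem.Dict.empty
      if hs.size = 1 then count + 1 else count)
    0

-- ===== PORT B =====
-- if not mat: return 0; else 1 point for mat[0] when non-empty with min == max, plus recurse on mat[1:]
def countIdenticalRows_alt : List (List Int) → Int
  | [] => 0
  | row :: rest =>
    let here : Int :=
      if row ≠ [] ∧ PySem.List.min? row (fun x => x) = PySem.List.max? row (fun x => x)
      then 1 else 0
    here + countIdenticalRows_alt rest

-- ===== PRECONDITION & SPEC =====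
def Spec_countIdenticalRows (mat : List (List Int)) (out : Int) : Prop := out = countIdenticalRows_alt mat
instance (mat : List (List Int)) (out : Int) : Decidable (Spec_countIdenticalRows mat out) := by unfold Spec_countIdenticalRows; infer_instance

-- ===== CLAIM (what is proved, stated in full; the proofs are below) =====
def Claim_equal_countIdenticalRows : Prop := ∀ (mat : List (List Int)), Dom_countIdenticalRows mat → Spec_countIdenticalRows mat (countIdenticalRows mat)

-- ===== LEMMAS AND PROOFS =====

-- Set.add never shrinks
theorem pv_length_le_add (s : PySem.Set Int) (x : Int) :
    s.length ≤ (PySem.Set.add s x).length := by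
  unfold PySem.Set.add
  split <;> simp

theorem pv_length_le_foldl_add (xs : List Int) (s : PySem.Set Int) :
    s.length ≤ (xs.foldl PySem.Set.add s).length := by
  induction xs generalizing s with
  | nil => simp
  | cons y ys ih => exact le_trans (pv_length_le_add s y) (ih _)

-- core: set of a nonempty row is a singleton iff the tail is all equal to the head
theorem pv_foldl_singleton (xs : List Int) (x : Int) :
    ((xs.foldl PySem.Set.add [x]).length = 1) ↔ (xs.all (· == x) = true) := by
  induction xs with
  | nil => simp
  | cons y ys ih =>
    by_cases hy : y = x
    · subst hy
      simp only [List.foldl_cons, List.all_cons, beq_self_eq_true, Bool.true_and]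
      have : PySem.Set.add [y] y = [y] := by unfold PySem.Set.add; simp
      rw [this, ih]
    · have hadd : PySem.Set.add [x] y = [x, y] := by
        unfold PySem.Set.add; simp [PySem.Set.contains, hy]
      simp only [List.foldl_cons, List.all_cons, hadd]
      constructor
      · intro h
        have hmono := pv_length_le_foldl_add ys [x, y]
        simp only [List.length_cons, List.length_nil] at hmono
        omega
      · intro h
        simp [hy] at h

theorem pv_set_length_eq (x : Int) (xs : List Int) :
    ((PySem.Set.ofList (x :: xs)).length = 1) ↔ (xs.all (· == x) = true) := by
  have : PySem.Set.ofList (x :: xs) = xs.foldl PySem.Set.add [x] := by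
    simp [PySem.Set.ofList_eq_foldl, PySem.Set.add, PySem.Set.contains]
  rw [this, pv_foldl_singleton]

-- A's per-row dict size equals the length of set(row)
theorem pv_dict_size (row : List Int) :
    (row.foldl (fun d x => d.insert x (1 : Int)) PySem.Dict.empty).size
      = (PySem.Set.ofList row).length := by
  have hk := PySem.Dict.keys_foldl_insert (l := row) (f := fun (_ : PySem.Dict Int Int) (_ : Int) => (1 : Int)) (d := PySem.Dict.empty)
  have hsz : ∀ (d : PySem.Dict Int Int), d.size = d.keys.length := by
    intro d; simp [PySem.Dict.size, PySem.Dict.keys]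
  rw [hsz, hk]
  simp [PySem.Set.update, PySem.Dict.keys_empty, PySem.Set.ofList_eq_foldl]

-- all-equal tail gives a constant running max / min
theorem pv_foldl_max_const (xs : List Int) (x : Int) (h : xs.all (· == x) = true) :
    xs.foldl max x = x := by
  induction xs with
  | nil => rfl
  | cons y ys ih =>
    simp only [List.all_cons, Bool.and_eq_true, beq_iff_eq] at h
    obtain ⟨hy, hys⟩ := h
    subst hy
    simpa using ih hys

theorem pv_foldl_min_const (xs : List Int) (x : Int) (h : xs.all (· == x) = true) :
    xs.foldl min x = x := by
  induction xs with
  | nil => rfl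
  | cons y ys ih =>
    simp only [List.all_cons, Bool.and_eq_true, beq_iff_eq] at h
    obtain ⟨hy, hys⟩ := h
    subst hy
    simpa using ih hys

-- B's order test on a nonempty row is the all-equal-head test
theorem pv_minmax_iff (x : Int) (xs : List Int) :
    (PySem.List.min? (x :: xs) (fun y => y) = PySem.List.max? (x :: xs) (fun y => y))
      ↔ (xs.all (· == x) = true) := by
  rw [PySem.List.min?_id_cons, PySem.List.max?_id_cons]
  constructor
  · intro h
    have hc : xs.foldl min x = xs.foldl max x := by simpa using h
    have hmin := PySem.List.min?_isMin (xs := x :: xs) (key := fun y => y)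
      (m := xs.foldl min x) (by rw [PySem.List.min?_id_cons])
    have hmax := PySem.List.max?_isMax (xs := x :: xs) (key := fun y => y)
      (m := xs.foldl max x) (by rw [PySem.List.max?_id_cons])
    simp only [List.all_eq_true, beq_iff_eq]
    intro y hy
    have h1 := hmin y (by simp [hy])
    have h2 := hmax y (by simp [hy])
    have h3 := hmin x (by simp)
    have h4 := hmax x (by simp)
    simp only at h1 h2 h3 h4
    omega
  · intro h
    rw [pv_foldl_min_const xs x h, pv_foldl_max_const xs x h]

-- bridge: A's per-row dict test equals B's per-row order test
theorem pv_row_test (row : List Int) :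
    ((row.foldl (fun d x => d.insert x (1 : Int)) PySem.Dict.empty).size = 1)
      ↔ (row ≠ [] ∧ PySem.List.min? row (fun y => y) = PySem.List.max? row (fun y => y)) := by
  rw [pv_dict_size]
  cases row with
  | nil => simp [PySem.Set.ofList, PySem.Set.empty]
  | cons x xs =>
    rw [pv_set_length_eq, pv_minmax_iff]
    simp

theorem pv_foldl_alt (mat : List (List Int)) (acc : Int) :
    mat.foldl
      (fun count row =>
        let hs := row.foldl (fun d x => d.insert x (1 : Int)) PySem.Dict.empty
        if hs.size = 1 then count + 1 else count)
      acc = acc + countIdenticalRows_alt mat := by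
  induction mat generalizing acc with
  | nil => simp [countIdenticalRows_alt]
  | cons row rest ih =>
    simp only [List.foldl_cons, countIdenticalRows_alt, ih]
    by_cases h : row ≠ [] ∧ PySem.List.min? row (fun y => y) = PySem.List.max? row (fun y => y)
    · rw [if_pos ((pv_row_test row).mpr h), if_pos h]; ring
    · rw [if_neg (fun hc => h ((pv_row_test row).mp hc)), if_neg h]; ring

-- ===== VERDICT (by name: the statement is the Claim_ definition above) =====
theorem countIdenticalRows_spec : Claim_equal_countIdenticalRows := by
  intro mat _
  unfold Spec_countIdenticalRows countIdenticalRows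
  rw [pv_foldl_alt]
  ring
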